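-- pv_equiv track=rewrite | github.com/knime/knime-bigdata | com.knime.features.bigdata.externals/maven2osgi/tpwrite.py | mvnversion2osgi
-- ===== SOURCE A (Python) =====
-- def mvnversion2osgi(mvnversion):
--     v = []
--     curr = None
--     lastDigit = False
--     lastChar = False
--     for c in mvnversion:
--         if c.isdigit():
--             if lastDigit:
--                 curr += c
--             else:
--                 if curr != None:
--                     v.append(curr)
--                 curr = c
--
--             lastDigit = True
--             lastChar = False
--         elif c.isalpha():
--             if lastChar:
--                 curr += c
--             else:
--                 if curr != None:
--                     v.append(curr)
--                 curr = c
--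
--             lastDigit = False
--             lastChar = True
--         else:
--             if curr != None:
--                 v.append(curr)
--
--             curr = None
--             lastDigit = False
--             lastChar = False
--
--     if curr != None:
--         v.append(curr)
--
--     major = 0
--     minor = 0
--     micro = 0
--     qualifier = ""
--
--     if v[0].isdigit():
--         major = int(v[0])
--     else:
--         qualifier = "".join(v[0:])
--         return "%d.%d.%d.%s" % (major, minor, micro, qualifier)
--
--     if (len(v) > 1) and (v[1].isdigit()):
--         minor = int(v[1])
--     elif len(v) > 1:
--         qualifier = "".join(v[1:])
--         return "%d.%d.%d.%s" % (major, minor, micro, qualifier)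
--
--     if (len(v) > 2) and (v[2].isdigit()):
--         micro = int(v[2])
--     elif len(v) > 2:
--         qualifier = "".join(v[2:])
--         return "%d.%d.%d.%s" % (major, minor, micro, qualifier)
--
--     if len(v) > 3:
--         qualifier = "".join(v[3:])
--         return "%d.%d.%d.%s" % (major, minor, micro, qualifier)
--
--     return "%d.%d.%d" % (major, minor, micro)
-- ===== SOURCE B (Python) =====
-- def _kind(c):
--     if c.isdigit():
--         return 'd'
--     if c.isalpha():
--         return 'a'
--     return 'o'
--
-- def mvnversion2osgi(mvnversion):
--     # Tokenize into maximal runs of same-kind characters, dropping separator runs.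
--     v = []
--     i = 0
--     n = len(mvnversion)
--     while i < n:
--         k = _kind(mvnversion[i])
--         j = i + 1
--         while j < n and _kind(mvnversion[j]) == k:
--             j += 1
--         if k != 'o':
--             v.append(mvnversion[i:j])
--         i = j
--     # Count leading numeric tokens (at most 3); the rest is the qualifier.
--     t = 0
--     while t < 3 and t < len(v) and v[t].isdigit():
--         t += 1
--     nums = [int(s) for s in v[:t]] + [0] * (3 - t)
--     qualifier = "".join(v[t:])
--     if qualifier:
--         return "%d.%d.%d.%s" % (nums[0], nums[1], nums[2], qualifier)
--     return "%d.%d.%d" % (nums[0], nums[1], nums[2])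
-- ===== Notes on version B (the rewrite author's own statement) =====
-- stated objective: simpler
-- what changed: Replaces A's lastDigit/lastChar/curr character state machine by a maximal-run tokenizer and collapses A's four-way return cascade into a single count of leading numeric tokens plus one format step.
-- outside the precondition, e.g. on mvnversion2osgi('--'): A raises IndexError, B returns '0.0.0'; on mvnversion2osgi(''): A raises IndexError, B returns '0.0.0'
import Mathlib
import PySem

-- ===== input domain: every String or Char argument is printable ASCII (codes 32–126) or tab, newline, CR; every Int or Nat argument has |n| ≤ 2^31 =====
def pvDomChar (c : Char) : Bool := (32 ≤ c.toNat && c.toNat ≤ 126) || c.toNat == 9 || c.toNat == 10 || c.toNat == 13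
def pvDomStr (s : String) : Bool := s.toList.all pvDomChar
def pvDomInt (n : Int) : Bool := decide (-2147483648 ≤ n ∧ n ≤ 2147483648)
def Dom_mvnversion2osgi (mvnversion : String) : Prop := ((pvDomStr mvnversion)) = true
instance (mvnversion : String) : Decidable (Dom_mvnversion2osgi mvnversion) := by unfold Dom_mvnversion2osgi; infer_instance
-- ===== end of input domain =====

-- B replaces A's lastDigit/lastChar/curr state machine by a maximal-run tokenizer and
-- replaces A's four-way return cascade by one leading-digit-token count (objective: simpler).

-- ===== PORT A =====
-- tokens are kept as List Char (Python str); "%d.%d.%d[.%s]" is spelled out, str(n) = PySem.Int.toChars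
def pvFmt3 (ma mi mc : Int) : String :=
  String.ofList (PySem.Int.toChars ma ++ '.' :: PySem.Int.toChars mi ++ '.' :: PySem.Int.toChars mc)
def pvFmt4 (ma mi mc : Int) (q : List Char) : String :=
  String.ofList (PySem.Int.toChars ma ++ '.' :: PySem.Int.toChars mi ++ '.' :: PySem.Int.toChars mc ++ '.' :: q)

-- one step of A's for-loop; state = (v, curr, lastDigit, lastChar); 'curr += c' is .map since
-- Python's curr is not None exactly when lastDigit/lastChar is set
def stepA (st : List (List Char) × Option (List Char) × Bool × Bool) (c : Char) :
    List (List Char) × Option (List Char) × Bool × Bool :=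
  match st with
  | (v, curr, lastDigit, lastChar) =>
    if PySem.Chars.isdigit c then
      if lastDigit then (v, curr.map (· ++ [c]), true, false)
      else (v ++ (match curr with | some p => [p] | none => []), some [c], true, false)
    else if PySem.Chars.isalpha c then
      if lastChar then (v, curr.map (· ++ [c]), false, true)
      else (v ++ (match curr with | some p => [p] | none => []), some [c], false, true)
    else
      (v ++ (match curr with | some p => [p] | none => []), none, false, false)

-- the 'if curr != None: v.append(curr)' after the loop
def finA (st : List (List Char) × Option (List Char) × Bool × Bool) : List (List Char) :=
  st.1 ++ (match st.2.1 with | some p => [p] | none => [])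

-- A's return cascade; the 'len(v) > k' checks become matches in the same order; int() on an
-- all-digit token is PySem.Int.ofChars? (some there, so .getD 0 is exact); "".join = flatten
-- (the [] case is Python's IndexError at v[0], excluded by Pre_)
def tailA : List (List Char) → String
  | [] => ""
  | v0 :: r1 =>
    if PySem.Chars.strIsdigit v0 then
      let major := (PySem.Int.ofChars? v0).getD 0
      match r1 with
      | [] => pvFmt3 major 0 0
      | v1 :: r2 =>
        if PySem.Chars.strIsdigit v1 then
          let minor := (PySem.Int.ofChars? v1).getD 0
          match r2 with
          | [] => pvFmt3 major minor 0
          | v2 :: r3 =>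
            if PySem.Chars.strIsdigit v2 then
              let micro := (PySem.Int.ofChars? v2).getD 0
              if r3 ≠ [] then pvFmt4 major minor micro r3.flatten
              else pvFmt3 major minor micro
            else pvFmt4 major minor 0 (v2 :: r3).flatten
        else pvFmt4 major 0 0 (v1 :: r2).flatten
    else pvFmt4 0 0 0 (v0 :: r1).flatten

def mvnversion2osgi (mvnversion : String) : String :=
  tailA (finA (mvnversion.toList.foldl stepA ([], none, false, false)))

-- ===== PORT B =====
def kindB (c : Char) : Char :=
  if PySem.Chars.isdigit c then 'd' else if PySem.Chars.isalpha c then 'a' else 'o'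

-- B's outer while loop: take the maximal run of the head's kind, keep it unless separator.
-- fuel = remaining length, only to make the recursion structural (never runs out)
def tokensBAux : Nat → List Char → List (List Char)
  | _, [] => []
  | 0, _ :: _ => []
  | fuel + 1, c :: cs =>
    let k := kindB c
    if k ≠ 'o' then
      (c :: cs.takeWhile (fun x => kindB x == k)) :: tokensBAux fuel (cs.dropWhile (fun x => kindB x == k))
    else tokensBAux fuel (cs.dropWhile (fun x => kindB x == k))

def tokensB (cs : List Char) : List (List Char) := tokensBAux cs.length cs

-- B's 'while t < 3 and t < len(v) and v[t].isdigit(): t += 1'; budget = 3 - t makes it structural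
def tcountBAux (v : List (List Char)) : Nat → Nat → Nat
  | 0, t => t
  | b + 1, t =>
    if t < v.length ∧ PySem.Chars.strIsdigit (v.getD t []) then tcountBAux v b (t + 1) else t

def tcountB (v : List (List Char)) : Nat := tcountBAux v 3 0

-- B's formatting tail ('if qualifier' = nonemptiness; "".join = flatten)
def tailB (v : List (List Char)) : String :=
  let t := tcountB v
  let nums := (v.take t).map (fun s => (PySem.Int.ofChars? s).getD 0) ++ List.replicate (3 - t) 0
  let q := (v.drop t).flatten
  if q ≠ [] then pvFmt4 (nums.getD 0 0) (nums.getD 1 0) (nums.getD 2 0) q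
  else pvFmt3 (nums.getD 0 0) (nums.getD 1 0) (nums.getD 2 0)

def mvnversion2osgi_alt (mvnversion : String) : String :=
  tailB (tokensB mvnversion.toList)

-- ===== PRECONDITION & SPEC =====
-- Pre_ excludes exactly the inputs with no alphanumeric character, on which Python A raises
-- IndexError at v[0] (B's algorithm returns "0.0.0" there).
def Pre_mvnversion2osgi (mvnversion : String) : Prop :=
  mvnversion.toList.any (fun c => PySem.Chars.isdigit c || PySem.Chars.isalpha c) = true
instance (mvnversion : String) : Decidable (Pre_mvnversion2osgi mvnversion) := by
  unfold Pre_mvnversion2osgi; infer_instance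
def pvWitness_mvnversion2osgi : String := "1.2.3-SNAPSHOT"

def Spec_mvnversion2osgi (mvnversion : String) (out : String) : Prop := out = mvnversion2osgi_alt mvnversion
instance (mvnversion : String) (out : String) : Decidable (Spec_mvnversion2osgi mvnversion out) := by unfold Spec_mvnversion2osgi; infer_instance

-- ===== CLAIM (what is proved, stated in full; the proofs are below) =====
def Claim_equal_mvnversion2osgi : Prop := ∀ (mvnversion : String), Dom_mvnversion2osgi mvnversion → Pre_mvnversion2osgi mvnversion → Spec_mvnversion2osgi mvnversion (mvnversion2osgi mvnversion)

-- ===== LEMMAS AND PROOFS =====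

-- the fuel argument of tokensBAux is irrelevant as long as it covers the length
lemma tokensBAux_congr : ∀ (f g : Nat) (cs : List Char), cs.length ≤ f → cs.length ≤ g →
    tokensBAux f cs = tokensBAux g cs := by
  intro f
  induction f with
  | zero => intro g cs hf _; rw [List.length_eq_zero_iff.mp (Nat.le_zero.mp hf)]; cases g <;> rfl
  | succ f ih =>
    intro g cs hf hg
    cases cs with
    | nil => cases g <;> rfl
    | cons c cs =>
      cases g with
      | zero => simp at hg
      | succ g =>
        simp only [tokensBAux]
        have hlen := List.length_dropWhile_le (fun x => kindB x == kindB c) cs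
        simp only [List.length_cons, Nat.add_le_add_iff_right] at hf hg
        rw [ih g _ (le_trans hlen hf) (le_trans hlen hg)]

-- tokensB's defining equation, fuel eliminated
lemma tokensB_cons (c : Char) (cs : List Char) :
    tokensB (c :: cs) =
      if kindB c ≠ 'o' then
        (c :: cs.takeWhile (fun x => kindB x == kindB c)) :: tokensB (cs.dropWhile (fun x => kindB x == kindB c))
      else tokensB (cs.dropWhile (fun x => kindB x == kindB c)) := by
  have h := tokensBAux_congr cs.length (cs.dropWhile (fun x => kindB x == kindB c)).length
    (cs.dropWhile (fun x => kindB x == kindB c)) (List.length_dropWhile_le _ _) le_rfl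
  simp only [tokensB, List.length_cons, tokensBAux, h]

-- tokensB ignores leading separator characters
lemma tokensB_dropWhile_o (cs : List Char) :
    tokensB (cs.dropWhile (fun x => kindB x == 'o')) = tokensB cs := by
  induction cs with
  | nil => rfl
  | cons c cs ih =>
    by_cases h : kindB c = 'o'
    · rw [List.dropWhile_cons_of_pos (by simp [h]), ih, tokensB_cons]
      simp [h, ih]
    · rw [List.dropWhile_cons_of_neg (by simp [h])]

-- the three reachable modes of A's state machine against B's run tokenizer
lemma machineA (cs : List Char) :
    (∀ acc, finA (cs.foldl stepA (acc, none, false, false)) = acc ++ tokensB cs) ∧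
    (∀ acc p, finA (cs.foldl stepA (acc, some p, true, false)) =
      acc ++ (p ++ cs.takeWhile (fun x => kindB x == 'd')) :: tokensB (cs.dropWhile (fun x => kindB x == 'd'))) ∧
    (∀ acc p, finA (cs.foldl stepA (acc, some p, false, true)) =
      acc ++ (p ++ cs.takeWhile (fun x => kindB x == 'a')) :: tokensB (cs.dropWhile (fun x => kindB x == 'a'))) := by
  induction cs with
  | nil => refine ⟨fun acc => by simp [finA, tokensB, tokensBAux], fun acc p => ?_, fun acc p => ?_⟩ <;>
      simp [finA, tokensB, tokensBAux]
  | cons c cs ih =>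
    obtain ⟨ihN, ihD, ihA⟩ := ih
    by_cases hd : PySem.Chars.isdigit c = true
    · have hk : kindB c = 'd' := by simp [kindB, hd]
      refine ⟨fun acc => ?_, fun acc p => ?_, fun acc p => ?_⟩
      · rw [List.foldl_cons, show stepA (acc, none, false, false) c = (acc, some [c], true, false)
          from by simp [stepA, hd], ihD]
        simp [tokensB_cons, hk]
      · rw [List.foldl_cons, show stepA (acc, some p, true, false) c = (acc, some (p ++ [c]), true, false)
          from by simp [stepA, hd], ihD]
        simp [hk]
      · rw [List.foldl_cons, show stepA (acc, some p, false, true) c = (acc ++ [p], some [c], true, false)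
          from by simp [stepA, hd], ihD]
        simp [tokensB_cons, hk]
    · by_cases ha : PySem.Chars.isalpha c = true
      · have hk : kindB c = 'a' := by simp [kindB, hd, ha]
        refine ⟨fun acc => ?_, fun acc p => ?_, fun acc p => ?_⟩
        · rw [List.foldl_cons, show stepA (acc, none, false, false) c = (acc, some [c], false, true)
            from by simp [stepA, hd, ha], ihA]
          simp [tokensB_cons, hk]
        · rw [List.foldl_cons, show stepA (acc, some p, true, false) c = (acc ++ [p], some [c], false, true)
            from by simp [stepA, hd, ha], ihA]
          simp [tokensB_cons, hk]
        · rw [List.foldl_cons, show stepA (acc, some p, false, true) c = (acc, some (p ++ [c]), false, true)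
            from by simp [stepA, hd, ha], ihA]
          simp [hk]
      · have hk : kindB c = 'o' := by simp [kindB, hd, ha]
        have hto : tokensB (c :: cs) = tokensB cs := by
          rw [tokensB_cons]
          simp [hk, tokensB_dropWhile_o cs]
        refine ⟨fun acc => ?_, fun acc p => ?_, fun acc p => ?_⟩
        · rw [List.foldl_cons, show stepA (acc, none, false, false) c = (acc, none, false, false)
            from by simp [stepA, hd, ha], ihN, hto]
        · rw [List.foldl_cons, show stepA (acc, some p, true, false) c = (acc ++ [p], none, false, false)
            from by simp [stepA, hd, ha], ihN]
          simp [hto, hk]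
        · rw [List.foldl_cons, show stepA (acc, some p, false, true) c = (acc ++ [p], none, false, false)
            from by simp [stepA, hd, ha], ihN]
          simp [hto, hk]

lemma tokensA_eq_tokensB (cs : List Char) :
    finA (cs.foldl stepA ([], none, false, false)) = tokensB cs := by
  simpa using (machineA cs).1 []

-- every token produced by B is a nonempty character run
lemma tokensBAux_ne_nil (f : Nat) : ∀ (cs : List Char), ∀ x ∈ tokensBAux f cs, x ≠ [] := by
  induction f with
  | zero => intro cs x hx; cases cs <;> simp [tokensBAux] at hx
  | succ f ih =>
    intro cs x hx
    cases cs with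
    | nil => simp [tokensBAux] at hx
    | cons c cs =>
      by_cases h : kindB c = 'o'
      · rw [show tokensBAux (f + 1) (c :: cs) =
            tokensBAux f (cs.dropWhile (fun x => kindB x == kindB c)) from by
          simp [tokensBAux, h]] at hx
        exact ih _ x hx
      · rw [show tokensBAux (f + 1) (c :: cs) =
            (c :: cs.takeWhile (fun x => kindB x == kindB c)) ::
              tokensBAux f (cs.dropWhile (fun x => kindB x == kindB c)) from by
          simp [tokensBAux, h]] at hx
        rcases List.mem_cons.mp hx with rfl | hx
        · simp
        · exact ih _ x hx

lemma tokensB_ne_nil (cs : List Char) : ∀ x ∈ tokensB cs, x ≠ [] :=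
  tokensBAux_ne_nil cs.length cs

-- a string with an alphanumeric character tokenizes to a nonempty list
lemma tokensB_ne_nil_of_any : ∀ (cs : List Char),
    (∃ c ∈ cs, (PySem.Chars.isdigit c || PySem.Chars.isalpha c) = true) →
    tokensB cs ≠ [] := by
  intro cs
  induction cs with
  | nil => simp
  | cons c cs ih =>
    intro ⟨x, hx, hal⟩
    by_cases h : kindB c = 'o'
    · have hcno : (PySem.Chars.isdigit c || PySem.Chars.isalpha c) = false := by
        by_cases h1 : PySem.Chars.isdigit c = true
        · simp [kindB, h1] at h
        · by_cases h2 : PySem.Chars.isalpha c = true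
          · simp [kindB, h1, h2] at h
          · simp [h1, h2]
      rw [tokensB_cons, if_neg (by simp [h]), h]
      rw [tokensB_dropWhile_o]
      apply ih
      rcases List.mem_cons.mp hx with rfl | hx
      · rw [hcno] at hal; exact absurd hal (by simp)
      · exact ⟨x, hx, hal⟩
    · rw [tokensB_cons, if_pos (by simp [h])]
      simp

-- the two formatting tails agree on nonempty lists of nonempty tokens
lemma tail_eq (v : List (List Char)) (hne : v ≠ []) (h : ∀ x ∈ v, x ≠ []) :
    tailA v = tailB v := by
  rcases v with _ | ⟨a, r1⟩
  · exact absurd rfl hne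
  have hA : a ≠ [] := h a (by simp)
  by_cases da : PySem.Chars.strIsdigit a = true
  · rcases r1 with _ | ⟨b, r2⟩
    · have ht : tcountB [a] = 1 := by simp [tcountB, tcountBAux, da]
      simp [tailA, tailB, ht, da]
    · have hB : b ≠ [] := h b (by simp)
      by_cases db : PySem.Chars.strIsdigit b = true
      · rcases r2 with _ | ⟨c, r3⟩
        · have ht : tcountB [a, b] = 2 := by simp [tcountB, tcountBAux, da, db]
          simp [tailA, tailB, ht, da, db]
        · have hC : c ≠ [] := h c (by simp)
          by_cases dc : PySem.Chars.strIsdigit c = true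
          · have ht : tcountB (a :: b :: c :: r3) = 3 := by
              simp [tcountB, tcountBAux, da, db, dc]
            rcases r3 with _ | ⟨d, r4⟩
            · simp [tailA, tailB, ht, da, db, dc]
            · have hD : d ≠ [] := h d (by simp)
              simp [tailA, tailB, ht, da, db, dc]
              exact fun hd _ => absurd hd hD
          · have ht : tcountB (a :: b :: c :: r3) = 2 := by
              simp [tcountB, tcountBAux, da, db, dc]
            simp [tailA, tailB, ht, da, db, dc]
            exact fun hc _ => absurd hc hC
      · have ht : tcountB (a :: b :: r2) = 1 := by
          simp [tcountB, tcountBAux, da, db]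
        simp [tailA, tailB, ht, da, db]
        exact fun hb _ => absurd hb hB
  · have ht : tcountB (a :: r1) = 0 := by simp [tcountB, tcountBAux, da]
    simp [tailA, tailB, ht, da]
    exact fun ha' _ => absurd ha' hA

-- ===== VERDICT (by name: the statement is the Claim_ definition above) =====
theorem mvnversion2osgi_spec : Claim_equal_mvnversion2osgi := by
  intro s _ hpre
  unfold Spec_mvnversion2osgi mvnversion2osgi mvnversion2osgi_alt
  rw [tokensA_eq_tokensB]
  exact tail_eq _
    (tokensB_ne_nil_of_any _ (by simpa [Pre_mvnversion2osgi, List.any_eq_true] using hpre))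
    (tokensB_ne_nil _)
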